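-- pv_equiv track=rewrite | github.com/Gtaverne/agent_smith | bot_agent_smith/src/skills/web_search/article_search.py | _generate_default_articles
-- ===== SOURCE A (Python) =====
-- from typing import List, Dict, Any
--
-- def _generate_default_articles(keywords: List[str]) -> List[Dict[str, Any]]:
--     """Generate default articles in case of parsing errors"""
--     default_articles = []
--
--     for i, keyword in enumerate(keywords):
--         default_articles.append({
--             "title": f"Understanding {keyword.capitalize()}",
--             "content": f"This article provides an overview of {keyword} and its implications. It covers the main aspects and current thinking on the topic.",
--             "url": f"https://example.com/article/{keyword.replace(' ', '-')}"
--         })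
--
--         # Add an opposing view for each keyword
--         default_articles.append({
--             "title": f"Challenging Common Views on {keyword.capitalize()}",
--             "content": f"This article presents alternative perspectives on {keyword}, questioning some commonly held assumptions. It offers different ways to think about this topic.",
--             "url": f"https://example.com/alternative-view/{keyword.replace(' ', '-')}"
--         })
--
--     return default_articles
-- ===== SOURCE B (Python) =====
-- # B: staged passes — build the full list of primary articles and the full list of
-- # opposing-view articles in two separate map passes, then interleave them with zip.
-- def _primary(kw):
--     return {
--         "title": f"Understanding {kw.capitalize()}",
--         "content": f"This article provides an overview of {kw} and its implications. It covers the main aspects and current thinking on the topic.",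
--         "url": f"https://example.com/article/{kw.replace(' ', '-')}",
--     }
--
-- def _opposing(kw):
--     return {
--         "title": f"Challenging Common Views on {kw.capitalize()}",
--         "content": f"This article presents alternative perspectives on {kw}, questioning some commonly held assumptions. It offers different ways to think about this topic.",
--         "url": f"https://example.com/alternative-view/{kw.replace(' ', '-')}",
--     }
--
-- def _generate_default_articles(keywords):
--     primaries = list(map(_primary, keywords))
--     opposings = list(map(_opposing, keywords))
--     out = []
--     for p, o in zip(primaries, opposings):
--         out.append(p)
--         out.append(o)
--     return out
-- ===== Notes on version B (the rewrite author's own statement) =====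
-- stated objective: alternative
-- what changed: Replaces A's single enumerate loop appending two dicts per keyword by staged passes: two separate map passes build the complete primary and opposing lists, which are then interleaved with zip.
import Mathlib
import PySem

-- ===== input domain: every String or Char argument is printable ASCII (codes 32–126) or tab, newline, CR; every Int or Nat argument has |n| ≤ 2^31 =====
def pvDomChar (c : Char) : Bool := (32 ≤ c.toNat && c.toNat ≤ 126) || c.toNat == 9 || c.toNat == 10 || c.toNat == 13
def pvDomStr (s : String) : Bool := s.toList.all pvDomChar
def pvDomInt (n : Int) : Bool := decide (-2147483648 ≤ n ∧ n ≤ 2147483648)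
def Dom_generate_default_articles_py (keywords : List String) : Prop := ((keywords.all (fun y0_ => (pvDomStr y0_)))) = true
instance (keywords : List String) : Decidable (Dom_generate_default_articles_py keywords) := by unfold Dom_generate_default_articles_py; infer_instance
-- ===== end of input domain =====

-- B builds the primary and opposing article lists in two separate map passes and then zip-interleaves them (vs A's one loop appending both per keyword); objective: alternative decomposition, same cost. 


-- ===== PORT A =====
-- Python str.capitalize() ported by hand (exact on the ASCII domain): first char uppercased, rest lowercased.
def pvCapitalize (s : String) : String :=
  match s.toList with
  | [] => ""
  | c :: rest => String.mk (PySem.Chars.upperChar c :: PySem.Chars.lower rest)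

def generate_default_articles_py (keywords : List String) : List (List (String × String)) :=
  keywords.foldl (fun default_articles keyword =>
    (default_articles ++
      [[("title", "Understanding " ++ pvCapitalize keyword),
        ("content", "This article provides an overview of " ++ keyword ++ " and its implications. It covers the main aspects and current thinking on the topic."),
        ("url", "https://example.com/article/" ++ PySem.Str.replace keyword " " "-")]]) ++
      [[("title", "Challenging Common Views on " ++ pvCapitalize keyword),
        ("content", "This article presents alternative perspectives on " ++ keyword ++ ", questioning some commonly held assumptions. It offers different ways to think about this topic."),
        ("url", "https://example.com/alternative-view/" ++ PySem.Str.replace keyword " " "-")]]) []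

-- ===== PORT B =====
def pvPrimary (kw : String) : List (String × String) :=
  [("title", "Understanding " ++ pvCapitalize kw),
   ("content", "This article provides an overview of " ++ kw ++ " and its implications. It covers the main aspects and current thinking on the topic."),
   ("url", "https://example.com/article/" ++ PySem.Str.replace kw " " "-")]

def pvOpposing (kw : String) : List (String × String) :=
  [("title", "Challenging Common Views on " ++ pvCapitalize kw),
   ("content", "This article presents alternative perspectives on " ++ kw ++ ", questioning some commonly held assumptions. It offers different ways to think about this topic."),
   ("url", "https://example.com/alternative-view/" ++ PySem.Str.replace kw " " "-")]

def generate_default_articles_py_alt (keywords : List String) : List (List (String × String)) :=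
  let primaries := keywords.map pvPrimary
  let opposings := keywords.map pvOpposing
  (primaries.zip opposings).foldl (fun out po => out ++ [po.1, po.2]) []

-- ===== PRECONDITION & SPEC =====
def Spec_generate_default_articles_py (keywords : List String) (out : List (List (String × String))) : Prop := out = generate_default_articles_py_alt keywords
instance (keywords : List String) (out : List (List (String × String))) : Decidable (Spec_generate_default_articles_py keywords out) := by unfold Spec_generate_default_articles_py; infer_instance

-- ===== CLAIM (what is proved, stated in full; the proofs are below) =====
def Claim_equal_generate_default_articles_py : Prop := ∀ (keywords : List String), Dom_generate_default_articles_py keywords → Spec_generate_default_articles_py keywords (generate_default_articles_py keywords)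

-- ===== LEMMAS AND PROOFS =====
lemma gda_both_folds (ks : List String) (acc : List (List (String × String))) :
    ks.foldl (fun default_articles keyword =>
    (default_articles ++
      [[("title", "Understanding " ++ pvCapitalize keyword),
        ("content", "This article provides an overview of " ++ keyword ++ " and its implications. It covers the main aspects and current thinking on the topic."),
        ("url", "https://example.com/article/" ++ PySem.Str.replace keyword " " "-")]]) ++
      [[("title", "Challenging Common Views on " ++ pvCapitalize keyword),
        ("content", "This article presents alternative perspectives on " ++ keyword ++ ", questioning some commonly held assumptions. It offers different ways to think about this topic."),
        ("url", "https://example.com/alternative-view/" ++ PySem.Str.replace keyword " " "-")]]) acc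
    = ((ks.map pvPrimary).zip (ks.map pvOpposing)).foldl (fun out po => out ++ [po.1, po.2]) acc := by
  induction ks generalizing acc with
  | nil => rfl
  | cons k t ih =>
    rw [List.foldl_cons, ih]
    simp [pvPrimary, pvOpposing]

-- ===== VERDICT (by name: the statement is the Claim_ definition above) =====
theorem generate_default_articles_py_spec : Claim_equal_generate_default_articles_py := by
  intro keywords _
  unfold Spec_generate_default_articles_py generate_default_articles_py generate_default_articles_py_alt
  exact gda_both_folds keywords []
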